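-- pv_equiv track=rewrite | github.com/voidlessVoid/advent_of_code_2019 | day_01/Dominik/Day1.py | fuel_req2
-- ===== SOURCE A (Python) =====
-- def fuel_req2(mass):
--     total_fuel = 0
--
--     def _fuel_req(m):
--         fuel = m // 3
--         if fuel <= 2:
--             return 0
--         else:
--             return fuel - 2
--
--     fuel_need = _fuel_req(mass)
--     if fuel_need > 0:
--         total_fuel += fuel_need
--         total_fuel += fuel_req2(fuel_need)
--     return total_fuel
-- ===== SOURCE B (Python) =====
-- def fuel_req2(mass):
--     total = 0
--     m = mass
--     while True:
--         fuel = m // 3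
--         if fuel <= 2:
--             break
--         fuel -= 2
--         total += fuel
--         m = fuel
--     return total
-- ===== Notes on version B (the rewrite author's own statement) =====
-- stated objective: simpler
-- what changed: Replaces the nested-helper recursion (with an inner _fuel_req function and recursive self-call) by a single iterative while-loop with a running accumulator.
import Mathlib
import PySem

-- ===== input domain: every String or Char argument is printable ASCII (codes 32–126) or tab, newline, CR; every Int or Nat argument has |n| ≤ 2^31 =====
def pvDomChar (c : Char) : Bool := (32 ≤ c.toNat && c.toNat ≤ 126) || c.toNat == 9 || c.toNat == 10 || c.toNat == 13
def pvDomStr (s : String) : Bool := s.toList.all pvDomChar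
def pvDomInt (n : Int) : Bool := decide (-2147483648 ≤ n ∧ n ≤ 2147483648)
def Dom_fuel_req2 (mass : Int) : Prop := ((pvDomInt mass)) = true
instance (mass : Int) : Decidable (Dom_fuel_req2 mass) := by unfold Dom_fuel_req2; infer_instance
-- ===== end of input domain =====

-- B replaces A's nested-helper recursion by an iterative accumulator loop (objective: simpler).
-- ===== PORT A =====
-- inner helper _fuel_req of A
def pvFuelStep (m : Int) : Int :=
  if PySem.Int.floordiv m 3 ≤ 2 then 0 else PySem.Int.floordiv m 3 - 2

-- termination fact cited by both ports' recursions
theorem pvDec (m : Int) (h : ¬ PySem.Int.floordiv m 3 ≤ 2) :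
    (PySem.Int.floordiv m 3 - 2).toNat < m.toNat := by
  rw [PySem.Int.floordiv_eq_ediv_of_pos (by norm_num)] at *
  omega

theorem pvFuelStep_lt (m : Int) (h : 0 < pvFuelStep m) : (pvFuelStep m).toNat < m.toNat := by
  unfold pvFuelStep at h ⊢
  by_cases hc : PySem.Int.floordiv m 3 ≤ 2
  · rw [if_pos hc] at h
    exact absurd h (by norm_num)
  · rw [if_neg hc] at h ⊢
    exact pvDec m hc

def fuel_req2 (mass : Int) : Int :=
  let fuel_need := pvFuelStep mass
  if h : fuel_need > 0 then fuel_need + fuel_req2 fuel_need else 0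
termination_by mass.toNat
decreasing_by exact pvFuelStep_lt mass h

-- ===== PORT B =====
-- the while-loop of Source B, with `total` and the current value `m` as state
def pvFuelLoop (total m : Int) : Int :=
  let fuel := PySem.Int.floordiv m 3
  if h : fuel ≤ 2 then total
  else pvFuelLoop (total + (fuel - 2)) (fuel - 2)
termination_by m.toNat
decreasing_by exact pvDec m h

def fuel_req2_alt (mass : Int) : Int := pvFuelLoop 0 mass

-- ===== PRECONDITION & SPEC =====
def Spec_fuel_req2 (mass : Int) (out : Int) : Prop := out = fuel_req2_alt mass
instance (mass : Int) (out : Int) : Decidable (Spec_fuel_req2 mass out) := by unfold Spec_fuel_req2; infer_instance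

-- ===== CLAIM (what is proved, stated in full; the proofs are below) =====
def Claim_equal_fuel_req2 : Prop := ∀ (mass : Int), Dom_fuel_req2 mass → Spec_fuel_req2 mass (fuel_req2 mass)

-- ===== LEMMAS AND PROOFS =====

-- ===== VERDICT (by name: the statement is the Claim_ definition above) =====
-- loop invariant: pvFuelLoop total m = total + fuel_req2 m
theorem pvFuelLoop_eq : ∀ (n : Nat) (m : Int), m.toNat = n →
    ∀ total, pvFuelLoop total m = total + fuel_req2 m := by
  intro n
  induction n using Nat.strong_induction_on with
  | _ n ih =>
    intro m hm total
    unfold pvFuelLoop fuel_req2 pvFuelStep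
    by_cases h : PySem.Int.floordiv m 3 ≤ 2
    · rw [dif_pos h, if_pos h]
      norm_num
    · rw [dif_neg h,
        ih ((PySem.Int.floordiv m 3 - 2).toNat) (hm ▸ pvDec m h) _ rfl]
      have hpos : PySem.Int.floordiv m 3 - 2 > 0 := by omega
      simp only [if_neg h]
      rw [dif_pos hpos]
      ring

theorem fuel_req2_spec : Claim_equal_fuel_req2 := by
  intro mass _
  unfold Spec_fuel_req2 fuel_req2_alt
  rw [pvFuelLoop_eq mass.toNat mass rfl]
  ring
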